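-- pv_equiv track=rewrite | github.com/SMSAraBert/SMS | SMS.py | emoji_native_translation
-- ===== SOURCE A (Python) =====
-- def emoji_native_translation(text):
--     text = text.lower()
--     loves = ["<3", "♥",'❤']
--     smilefaces = []
--     sadfaces = []
--     neutralfaces = []
--
--     eyes = ["8",":","=",";"]
--     nose = ["'","`","-",r"\\"]
--     for e in eyes:
--         for n in nose:
--             for s in ["\)", "d", "]", "}","p"]:
--                 smilefaces.append(e+n+s)
--                 smilefaces.append(e+s)
--             for s in ["\(", "\[", "{"]:
--                 sadfaces.append(e+n+s)
--                 sadfaces.append(e+s)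
--             for s in ["\|", "\/", r"\\"]:
--                 neutralfaces.append(e+n+s)
--                 neutralfaces.append(e+s)
--             #reversed
--             for s in ["\(", "\[", "{"]:
--                 smilefaces.append(s+n+e)
--                 smilefaces.append(s+e)
--             for s in ["\)", "\]", "}"]:
--                 sadfaces.append(s+n+e)
--                 sadfaces.append(s+e)
--             for s in ["\|", "\/", r"\\"]:
--                 neutralfaces.append(s+n+e)
--                 neutralfaces.append(s+e)
--
--     smilefaces = list(set(smilefaces))
--     sadfaces = list(set(sadfaces))
--     neutralfaces = list(set(neutralfaces))
--     t = []
--     for w in text.split():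
--         if w in loves:
--             t.append("حب")
--         elif w in smilefaces:
--             t.append("مضحك")
--         elif w in neutralfaces:
--             t.append("عادي")
--         elif w in sadfaces:
--             t.append("محزن")
--         else:
--             t.append(w)
--     newText = " ".join(t)
--     return newText
-- ===== SOURCE B (Python) =====
-- def emoji_native_translation(text):
--     # B parses each word structurally (eye + optional nose + mouth, or the
--     # reversed shape) instead of matching against precomputed token lists.
--     EYES = "8:=;"
--     NOSES = ("'", "`", "-", "\\\\")
--     # categories in A's branch-precedence order: smile, neutral, sad
--     CATS = [
--         ("مضحك", ("\\)", "d", "]", "}", "p"), ("\\(", "\\[", "{")),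
--         ("عادي", ("\\|", "\\/", "\\\\"), ("\\|", "\\/", "\\\\")),
--         ("محزن", ("\\(", "\\[", "{"), ("\\)", "\\]", "}")),
--     ]
--
--     def classify(w):
--         if w in ("<3", "\u2665", "\u2764"):
--             return "حب"
--         # forward shape: eye, then optional nose, then a mouth (tail)
--         if w and w[0] in EYES:
--             r = w[1:]
--             fw = [r] + [r[len(n):] for n in NOSES if r.startswith(n)]
--         else:
--             fw = []
--         # reversed shape: a mouth (head), then optional nose, then eye
--         if w and w[-1] in EYES:
--             r = w[:-1]
--             bw = [r] + [r[:len(r) - len(n)] for n in NOSES if r.endswith(n)]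
--         else:
--             bw = []
--         for word, tails, heads in CATS:
--             if any(t in tails for t in fw) or any(h in heads for h in bw):
--                 return word
--         return w
--
--     return " ".join(classify(w) for w in text.lower().split())
-- ===== Notes on version B (the rewrite author's own statement) =====
-- stated objective: alternative
-- what changed: B classifies each word by structurally parsing it (leading/trailing eye character, an optional nose stripped, the remaining mouth checked per category in A's precedence order) instead of A's membership tests against hundreds of precomputed emoticon tokens; no token lists are built at all.
import Mathlib
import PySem

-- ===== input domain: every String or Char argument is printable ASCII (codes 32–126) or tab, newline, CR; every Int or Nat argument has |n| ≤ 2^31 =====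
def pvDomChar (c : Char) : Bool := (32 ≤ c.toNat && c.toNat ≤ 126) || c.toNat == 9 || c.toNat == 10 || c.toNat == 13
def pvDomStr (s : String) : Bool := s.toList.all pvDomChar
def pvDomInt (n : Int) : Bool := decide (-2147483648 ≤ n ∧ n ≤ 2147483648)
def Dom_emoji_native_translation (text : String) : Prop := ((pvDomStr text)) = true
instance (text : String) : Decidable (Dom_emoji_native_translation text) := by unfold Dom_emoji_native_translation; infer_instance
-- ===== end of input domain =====

-- B classifies each word by structurally parsing it (eye char + optional nose + mouth,
-- or the reversed shape) instead of A's membership tests in precomputed token lists;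
-- objective: alternative algorithm, same observable behaviour.

-- ===== PORT A =====
-- A's text-independent emoticon-list construction (the nested for-loops of A, verbatim)
def pvA_faces : List String × List String × List String :=
  (["8", ":", "=", ";"]).foldl (fun acc e =>
    (["'", "`", "-", "\\\\"]).foldl (fun acc n =>
      let sm := (["\\)", "d", "]", "}", "p"]).foldl (fun l s => l ++ [e ++ n ++ s] ++ [e ++ s]) acc.1
      let sa := (["\\(", "\\[", "{"]).foldl (fun l s => l ++ [e ++ n ++ s] ++ [e ++ s]) acc.2.1
      let ne := (["\\|", "\\/", "\\\\"]).foldl (fun l s => l ++ [e ++ n ++ s] ++ [e ++ s]) acc.2.2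
      let sm := (["\\(", "\\[", "{"]).foldl (fun l s => l ++ [s ++ n ++ e] ++ [s ++ e]) sm
      let sa := (["\\)", "\\]", "}"]).foldl (fun l s => l ++ [s ++ n ++ e] ++ [s ++ e]) sa
      let ne := (["\\|", "\\/", "\\\\"]).foldl (fun l s => l ++ [s ++ n ++ e] ++ [s ++ e]) ne
      (sm, sa, ne)) acc) ([], [], [])

def emoji_native_translation (text : String) : String :=
  let text := PySem.Str.lower text
  let loves : List String := ["<3", "♥", "❤"]
  let smilefaces : PySem.Set String := PySem.Set.ofList pvA_faces.1
  let sadfaces : PySem.Set String := PySem.Set.ofList pvA_faces.2.1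
  let neutralfaces : PySem.Set String := PySem.Set.ofList pvA_faces.2.2
  let t := (PySem.Str.split₀ text).foldl (fun t w =>
    if w ∈ loves then t ++ ["حب"]
    else if w ∈ smilefaces then t ++ ["مضحك"]
    else if w ∈ neutralfaces then t ++ ["عادي"]
    else if w ∈ sadfaces then t ++ ["محزن"]
    else t ++ [w]) []
  PySem.Str.join " " t

-- ===== PORT B =====
def pvEyesC : List Char := ['8', ':', '=', ';']
def pvNosesC : List (List Char) := [['\''], ['`'], ['-'], ['\\', '\\']]

-- categories in A's branch-precedence order: smile, neutral, sad
def pvCats : List (String × List (List Char) × List (List Char)) :=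
  [("مضحك", [['\\', ')'], ['d'], [']'], ['}'], ['p']], [['\\', '('], ['\\', '['], ['{']]),
   ("عادي", [['\\', '|'], ['\\', '/'], ['\\', '\\']], [['\\', '|'], ['\\', '/'], ['\\', '\\']]),
   ("محزن", [['\\', '('], ['\\', '['], ['{']], [['\\', ')'], ['\\', ']'], ['}']])]

-- Source B: [r] + [r[len(n):] for n in NOSES if r.startswith(n)]
def pvCands (r : List Char) : List (List Char) :=
  [r] ++ pvNosesC.filterMap (fun n => if n.isPrefixOf r then some (r.drop n.length) else none)

-- Source B: [r] + [r[:len(r)-len(n)] for n in NOSES if r.endswith(n)]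
def pvRCands (r : List Char) : List (List Char) :=
  [r] ++ pvNosesC.filterMap (fun n => if n.isSuffixOf r then some (r.take (r.length - n.length)) else none)

-- 'w and w[0] in EYES' then candidates of w[1:]
def pvFw : List Char → List (List Char)
  | [] => []
  | c :: r => if c ∈ pvEyesC then pvCands r else []

-- 'w and w[-1] in EYES' then reversed candidates of w[:-1] (getLast?/dropLast = w[-1]/w[:-1])
def pvBw (cs : List Char) : List (List Char) :=
  match cs.getLast? with
  | none => []
  | some c => if c ∈ pvEyesC then pvRCands cs.dropLast else []

def pvClassify (w : String) : String :=
  if w ∈ (["<3", "♥", "❤"] : List String) then "حب"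
  else
    let fw := pvFw w.toList
    let bw := pvBw w.toList
    match pvCats.find? (fun ct => fw.any (· ∈ ct.2.1) || bw.any (· ∈ ct.2.2)) with
    | some ct => ct.1
    | none => w

def emoji_native_translation_alt (text : String) : String :=
  PySem.Str.join " " ((PySem.Str.split₀ (PySem.Str.lower text)).map pvClassify)

-- ===== PRECONDITION & SPEC =====
def Spec_emoji_native_translation (text : String) (out : String) : Prop := out = emoji_native_translation_alt text
instance (text : String) (out : String) : Decidable (Spec_emoji_native_translation text out) := by unfold Spec_emoji_native_translation; infer_instance

-- ===== CLAIM (what is proved, stated in full; the proofs are below) =====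
def Claim_equal_emoji_native_translation : Prop := ∀ (text : String), Dom_emoji_native_translation text → Spec_emoji_native_translation text (emoji_native_translation text)

-- ===== LEMMAS AND PROOFS =====

-- proof-side: all tokens of one category, generated as eye+optional nose+mouth and reversed
def pvNoseOpt : List (List Char) := [] :: pvNosesC

def pvGen (tails heads : List (List Char)) : List (List Char) :=
  pvEyesC.flatMap (fun e => pvNoseOpt.flatMap (fun n => tails.map (fun s => e :: (n ++ s))))
    ++ pvEyesC.flatMap (fun e => pvNoseOpt.flatMap (fun n => heads.map (fun s => s ++ n ++ [e])))

def pvMatch (cs : List Char) (tails heads : List (List Char)) : Bool :=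
  (pvFw cs).any (· ∈ tails) || (pvBw cs).any (· ∈ heads)

theorem mem_cands {x r : List Char} (h : x ∈ pvCands r) :
    r = x ∨ ∃ n ∈ pvNosesC, r = n ++ x := by
  simp only [pvCands, List.cons_append, List.nil_append, List.mem_cons, List.mem_filterMap] at h
  rcases h with h | ⟨n, hn, h⟩
  · exact Or.inl h.symm
  · by_cases hp : n.isPrefixOf r
    · rw [if_pos hp, Option.some_inj] at h
      obtain ⟨t, ht⟩ := List.isPrefixOf_iff_prefix.mp hp
      refine Or.inr ⟨n, hn, ?_⟩
      rw [← h, ← ht, List.drop_left]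
    · rw [if_neg hp] at h; exact absurd h (by simp)

theorem cands_mem {n s : List Char} (hn : n ∈ pvNoseOpt) : s ∈ pvCands (n ++ s) := by
  rcases List.mem_cons.mp hn with h | h
  · subst h; simp [pvCands]
  · simp only [pvCands, List.cons_append, List.nil_append, List.mem_cons, List.mem_filterMap]
    refine Or.inr ⟨n, h, ?_⟩
    have hp : n.isPrefixOf (n ++ s) = true := List.isPrefixOf_iff_prefix.mpr ⟨s, rfl⟩
    rw [if_pos hp, Option.some_inj, List.drop_left]

theorem mem_rcands {x r : List Char} (h : x ∈ pvRCands r) :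
    r = x ∨ ∃ n ∈ pvNosesC, r = x ++ n := by
  simp only [pvRCands, List.cons_append, List.nil_append, List.mem_cons, List.mem_filterMap] at h
  rcases h with h | ⟨n, hn, h⟩
  · exact Or.inl h.symm
  · by_cases hp : n.isSuffixOf r
    · rw [if_pos hp, Option.some_inj] at h
      obtain ⟨t, ht⟩ := List.isSuffixOf_iff_suffix.mp hp
      refine Or.inr ⟨n, hn, ?_⟩
      have hlen : (t ++ n).length - n.length = t.length := by simp
      rw [← h, ← ht, hlen, List.take_left]
    · rw [if_neg hp] at h; exact absurd h (by simp)

theorem rcands_mem {n s : List Char} (hn : n ∈ pvNoseOpt) : s ∈ pvRCands (s ++ n) := by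
  rcases List.mem_cons.mp hn with h | h
  · subst h; simp [pvRCands]
  · simp only [pvRCands, List.cons_append, List.nil_append, List.mem_cons, List.mem_filterMap]
    refine Or.inr ⟨n, h, ?_⟩
    have hp : n.isSuffixOf (s ++ n) = true := List.isSuffixOf_iff_suffix.mpr ⟨s, rfl⟩
    have hlen : (s ++ n).length - n.length = s.length := by simp
    rw [if_pos hp, Option.some_inj, hlen, List.take_left]

theorem match_iff_gen (cs : List Char) (tails heads : List (List Char)) :
    pvMatch cs tails heads = true ↔ cs ∈ pvGen tails heads := by
  constructor
  · intro h
    simp only [pvMatch, Bool.or_eq_true, List.any_eq_true, decide_eq_true_eq] at h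
    rcases h with ⟨x, hx, hxt⟩ | ⟨x, hx, hxh⟩
    · -- forward shape
      cases cs with
      | nil => simp [pvFw] at hx
      | cons c r =>
        simp only [pvFw] at hx
        by_cases he : c ∈ pvEyesC
        · rw [if_pos he] at hx
          refine List.mem_append.mpr (Or.inl ?_)
          simp only [List.mem_flatMap, List.mem_map]
          rcases mem_cands hx with h' | ⟨n, hn, h'⟩
          · exact ⟨c, he, [], by simp [pvNoseOpt], x, hxt, by rw [h']; simp⟩
          · exact ⟨c, he, n, by simp [pvNoseOpt, hn], x, hxt, by rw [h']⟩
        · rw [if_neg he] at hx; simp at hx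
    · -- reversed shape
      cases cs using List.reverseRecOn with
      | nil => simp [pvBw] at hx
      | append_singleton r c =>
        simp only [pvBw, List.getLast?_concat, List.dropLast_concat] at hx
        by_cases he : c ∈ pvEyesC
        · rw [if_pos he] at hx
          refine List.mem_append.mpr (Or.inr ?_)
          simp only [List.mem_flatMap, List.mem_map]
          rcases mem_rcands hx with h' | ⟨n, hn, h'⟩
          · exact ⟨c, he, [], by simp [pvNoseOpt], x, hxh, by rw [h']; simp⟩
          · exact ⟨c, he, n, by simp [pvNoseOpt, hn], x, hxh, by rw [h']⟩
        · rw [if_neg he] at hx; simp at hx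
  · intro h
    simp only [pvGen, List.mem_append, List.mem_flatMap, List.mem_map] at h
    simp only [pvMatch, Bool.or_eq_true, List.any_eq_true, decide_eq_true_eq]
    rcases h with ⟨e, he, n, hn, s, hs, hcs⟩ | ⟨e, he, n, hn, s, hs, hcs⟩
    · subst hcs
      refine Or.inl ⟨s, ?_, hs⟩
      simp only [pvFw, he, if_pos]
      exact cands_mem hn
    · subst hcs
      refine Or.inr ⟨s, ?_, hs⟩
      have h1 : (s ++ n ++ [e]).getLast? = some e := by simp
      have h2 : (s ++ n ++ [e]).dropLast = s ++ n := by simp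
      simp only [pvBw, h1, h2, he, if_pos]
      exact rcands_mem hn

-- A's generated category lists contain the same tokens as the parser's shapes
set_option maxRecDepth 100000 in
theorem smile_gen (x : List Char) :
    x ∈ (pvA_faces.1).map String.toList ↔
      x ∈ pvGen [['\\', ')'], ['d'], [']'], ['}'], ['p']] [['\\', '('], ['\\', '['], ['{']] := by
  constructor <;> intro h
  · exact (by decide : ∀ y ∈ (pvA_faces.1).map String.toList,
      y ∈ pvGen [['\\', ')'], ['d'], [']'], ['}'], ['p']] [['\\', '('], ['\\', '['], ['{']]) x h
  · exact (by decide : ∀ y ∈ pvGen [['\\', ')'], ['d'], [']'], ['}'], ['p']] [['\\', '('], ['\\', '['], ['{']],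
      y ∈ (pvA_faces.1).map String.toList) x h

set_option maxRecDepth 100000 in
theorem neutral_gen (x : List Char) :
    x ∈ (pvA_faces.2.2).map String.toList ↔
      x ∈ pvGen [['\\', '|'], ['\\', '/'], ['\\', '\\']] [['\\', '|'], ['\\', '/'], ['\\', '\\']] := by
  constructor <;> intro h
  · exact (by decide : ∀ y ∈ (pvA_faces.2.2).map String.toList,
      y ∈ pvGen [['\\', '|'], ['\\', '/'], ['\\', '\\']] [['\\', '|'], ['\\', '/'], ['\\', '\\']]) x h
  · exact (by decide : ∀ y ∈ pvGen [['\\', '|'], ['\\', '/'], ['\\', '\\']] [['\\', '|'], ['\\', '/'], ['\\', '\\']],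
      y ∈ (pvA_faces.2.2).map String.toList) x h

set_option maxRecDepth 100000 in
theorem sad_gen (x : List Char) :
    x ∈ (pvA_faces.2.1).map String.toList ↔
      x ∈ pvGen [['\\', '('], ['\\', '['], ['{']] [['\\', ')'], ['\\', ']'], ['}']] := by
  constructor <;> intro h
  · exact (by decide : ∀ y ∈ (pvA_faces.2.1).map String.toList,
      y ∈ pvGen [['\\', '('], ['\\', '['], ['{']] [['\\', ')'], ['\\', ']'], ['}']]) x h
  · exact (by decide : ∀ y ∈ pvGen [['\\', '('], ['\\', '['], ['{']] [['\\', ')'], ['\\', ']'], ['}']],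
      y ∈ (pvA_faces.2.1).map String.toList) x h

theorem mem_strings_iff (w : String) (L : List String) :
    w ∈ L ↔ w.toList ∈ L.map String.toList := by
  constructor
  · intro h; exact List.mem_map.mpr ⟨w, h, rfl⟩
  · intro h
    rcases List.mem_map.mp h with ⟨y, hy, he⟩
    rwa [String.toList_inj.mp he.symm]

-- B's parse-based classification = A's four-way membership branch, for every word
theorem find3_eq (p : String × List (List Char) × List (List Char) → Bool)
    (a b c : String × List (List Char) × List (List Char)) :
    List.find? p [a, b, c] =
      if p a then some a else if p b then some b else if p c then some c else none := by
  simp only [List.find?]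
  cases p a <;> cases p b <;> cases p c <;> simp

theorem classify_eq (w : String) :
    (if w ∈ (["<3", "♥", "❤"] : List String) then "حب"
     else if w ∈ PySem.Set.ofList pvA_faces.1 then "مضحك"
     else if w ∈ PySem.Set.ofList pvA_faces.2.2 then "عادي"
     else if w ∈ PySem.Set.ofList pvA_faces.2.1 then "محزن"
     else w) = pvClassify w := by
  by_cases hl : w ∈ (["<3", "♥", "❤"] : List String)
  · simp [pvClassify, hl]
  · have hM : ∀ (cs : List Char) (T H : List (List Char)),
        ((pvFw cs).any (· ∈ T) || (pvBw cs).any (· ∈ H)) = pvMatch cs T H := fun _ _ _ => rfl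
    have hsm : (w ∈ PySem.Set.ofList pvA_faces.1) ↔
        pvMatch w.toList [['\\', ')'], ['d'], [']'], ['}'], ['p']] [['\\', '('], ['\\', '['], ['{']] = true := by
      rw [PySem.Set.mem_ofList, mem_strings_iff, smile_gen, ← match_iff_gen]
    have hne : (w ∈ PySem.Set.ofList pvA_faces.2.2) ↔
        pvMatch w.toList [['\\', '|'], ['\\', '/'], ['\\', '\\']] [['\\', '|'], ['\\', '/'], ['\\', '\\']] = true := by
      rw [PySem.Set.mem_ofList, mem_strings_iff, neutral_gen, ← match_iff_gen]
    have hsa : (w ∈ PySem.Set.ofList pvA_faces.2.1) ↔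
        pvMatch w.toList [['\\', '('], ['\\', '['], ['{']] [['\\', ')'], ['\\', ']'], ['}']] = true := by
      rw [PySem.Set.mem_ofList, mem_strings_iff, sad_gen, ← match_iff_gen]
    simp only [pvClassify, pvCats, find3_eq, hM]
    rw [if_neg hl, if_neg hl]
    by_cases m1 : w ∈ PySem.Set.ofList pvA_faces.1 <;>
    by_cases m2 : w ∈ PySem.Set.ofList pvA_faces.2.2 <;>
    by_cases m3 : w ∈ PySem.Set.ofList pvA_faces.2.1 <;>
    simp [← hsm, ← hne, ← hsa, m1, m2, m3]

-- ===== VERDICT (by name: the statement is the Claim_ definition above) =====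
theorem emoji_native_translation_spec : Claim_equal_emoji_native_translation := by
  intro text _
  show emoji_native_translation text = emoji_native_translation_alt text
  have hfun : (fun (t : List String) (w : String) =>
      if w ∈ (["<3", "♥", "❤"] : List String) then t ++ ["حب"]
      else if w ∈ PySem.Set.ofList pvA_faces.1 then t ++ ["مضحك"]
      else if w ∈ PySem.Set.ofList pvA_faces.2.2 then t ++ ["عادي"]
      else if w ∈ PySem.Set.ofList pvA_faces.2.1 then t ++ ["محزن"]
      else t ++ [w])
      = fun t w => t ++ [pvClassify w] := by
    funext t w
    rw [← classify_eq w]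
    split_ifs <;> rfl
  simp only [emoji_native_translation, emoji_native_translation_alt, hfun,
    PySem.List.foldl_append_singleton_eq_map, List.nil_append]
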